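-- pv_equiv track=rewrite | github.com/fjambe/Vallex4UMR | converter.py | roles_to_propbank
-- ===== SOURCE A (Python) =====
-- def roles_to_propbank(roles: list):
--     """
--     Function to convert ACT/PAT/... functors to ARG0/ARG1/... PropBank roles.
--     Based on a custom hierarchy (cf. default mapping available at
--     https://github.com/ufal/UMR/blob/main/tecto2umr/dafault-functors-to-umrlabels.txt).
--     Only ACT and PAT are fixed (ARG0 and ARG1, respectively). Arguments follow, then adjuncts.
--     """
--     functor_hierarchy = [
--         'ACT', 'PAT', 'ADDR', 'EFF', 'ORIG', 'BEN', 'DIFF', 'REG', 'MANN', 'DIR1', 'DIR3', 'DIR2', 'LOC',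
--         'TOWH', 'TFHL', 'TWHEN', 'MEANS', 'EXT', 'AIM', 'MAT', 'INTT', 'CAUS', 'CPR', 'APP', 'ACMP'
--     ]
--
--     sorted_functors = sorted(f for f in roles if f.strip() not in ['---', ''])
--     pb_roles = []
--     # Assign ARG0 to ACT and ARG1 to PAT if present, and track current_arg
--     current_arg = 0
--     for functor in ['ACT', 'PAT']:
--         if functor in sorted_functors:
--             pb_roles.append(f"{functor} [ARG{current_arg}]")
--             current_arg += 1
--             sorted_functors.remove(functor)
--
--     # Assign remaining functors to ARG starting from current_arg
--     pb_roles += [f"{functor} [ARG{current_arg + idx}]" for idx, functor in enumerate(sorted(sorted_functors, key=lambda f: functor_hierarchy.index(f)))]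
--
--     return ", ".join(pb_roles)
-- ===== SOURCE B (Python) =====
-- def roles_to_propbank(roles: list):
--     """Single sort-and-label pass: ACT and PAT are hierarchy positions 0 and 1,
--     so one sort by hierarchy index replaces the ACT/PAT special-case phase."""
--     functor_hierarchy = [
--         'ACT', 'PAT', 'ADDR', 'EFF', 'ORIG', 'BEN', 'DIFF', 'REG', 'MANN', 'DIR1', 'DIR3', 'DIR2', 'LOC',
--         'TOWH', 'TFHL', 'TWHEN', 'MEANS', 'EXT', 'AIM', 'MAT', 'INTT', 'CAUS', 'CPR', 'APP', 'ACMP'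
--     ]
--     kept = sorted((f for f in roles if f.strip() not in ('---', '')), key=functor_hierarchy.index)
--     return ", ".join(f"{f} [ARG{i}]" for i, f in enumerate(kept))
-- ===== Notes on version B (the rewrite author's own statement) =====
-- stated objective: simpler
-- what changed: Replaces A's two-phase decomposition (alphabetical pre-sort, ACT/PAT membership-and-remove loop with a current_arg accumulator, then a second sort of the remainder) by a single sort of the filtered list by hierarchy index followed by one enumerate-and-label pass.
import Mathlib
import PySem

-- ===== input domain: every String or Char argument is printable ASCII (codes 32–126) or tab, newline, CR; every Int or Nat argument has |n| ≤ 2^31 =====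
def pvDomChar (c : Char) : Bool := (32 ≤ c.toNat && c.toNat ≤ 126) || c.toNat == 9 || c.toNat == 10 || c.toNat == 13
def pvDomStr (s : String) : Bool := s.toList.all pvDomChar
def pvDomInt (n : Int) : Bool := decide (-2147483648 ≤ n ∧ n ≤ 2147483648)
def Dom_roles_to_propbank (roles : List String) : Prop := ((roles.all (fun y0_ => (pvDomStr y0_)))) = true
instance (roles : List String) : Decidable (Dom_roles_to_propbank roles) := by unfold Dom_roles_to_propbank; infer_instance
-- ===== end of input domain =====

-- B replaces A's two-phase scheme (alphabetical pre-sort, ACT/PAT membership-and-remove loop with a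
-- current_arg accumulator, second sort of the remainder) by one sort by hierarchy index plus one
-- enumerate-and-label pass; objective: simpler.

-- the functor hierarchy constant shared by both programs (same literal in Source A and Source B)
def pvHier : List String := [
  "ACT", "PAT", "ADDR", "EFF", "ORIG", "BEN", "DIFF", "REG", "MANN", "DIR1", "DIR3", "DIR2", "LOC",
  "TOWH", "TFHL", "TWHEN", "MEANS", "EXT", "AIM", "MAT", "INTT", "CAUS", "CPR", "APP", "ACMP"]

-- ===== PORT A =====
def roles_to_propbank (roles : List String) : String :=
  let sorted_functors := PySem.List.sorted
    (roles.filter (fun f => !(["---", ""].contains (PySem.Str.strip f)))) (fun f => f) false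
  -- for functor in ['ACT','PAT']: state = (pb_roles, current_arg, sorted_functors)
  let st := (["ACT", "PAT"] : List String).foldl (fun st functor =>
    if st.2.2.contains functor then
      (st.1 ++ [functor ++ " [ARG" ++ PySem.Int.toStr st.2.1 ++ "]"], st.2.1 + 1,
       -- sorted_functors.remove(functor): the branch guarantees membership, so remove? is some
       (PySem.List.remove? st.2.2 functor).getD st.2.2)
    else st) (([] : List String), (0 : Int), sorted_functors)
  -- functor_hierarchy.index(f) raises ValueError when f ∉ pvHier: those inputs are outside Pre_
  let pb_roles := st.1 ++ (PySem.List.enumerate (PySem.List.sorted st.2.2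
      (fun f => (PySem.List.index? pvHier f).getD pvHier.length) false)).map
      (fun p => p.2 ++ " [ARG" ++ PySem.Int.toStr (st.2.1 + p.1) ++ "]")
  PySem.Str.join ", " pb_roles

-- ===== PORT B =====
def roles_to_propbank_alt (roles : List String) : String :=
  -- functor_hierarchy.index(f) raises ValueError when f ∉ pvHier: those inputs are outside Pre_
  let kept := PySem.List.sorted
    (roles.filter (fun f => !(["---", ""].contains (PySem.Str.strip f))))
    (fun f => (PySem.List.index? pvHier f).getD pvHier.length) false
  PySem.Str.join ", " ((PySem.List.enumerate kept).map
    (fun p => p.2 ++ " [ARG" ++ PySem.Int.toStr p.1 ++ "]"))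

-- ===== PRECONDITION & SPEC =====
-- Pre_ excludes (a) inputs with a kept functor outside the hierarchy, on which A raises ValueError,
-- and (b) lists with two or more 'ACT' together with a 'PAT', on which A's remove-then-resort order
-- and B's single-sort order are both defensible readings of a duplicate-functor list.
def Pre_roles_to_propbank (roles : List String) : Prop :=
  (∀ f ∈ roles, PySem.Str.strip f ≠ "---" → PySem.Str.strip f ≠ "" → f ∈ pvHier) ∧
  (roles.count "ACT" ≤ 1 ∨ roles.count "PAT" = 0)
instance (roles : List String) : Decidable (Pre_roles_to_propbank roles) := by
  unfold Pre_roles_to_propbank; infer_instance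
def pvWitness_roles_to_propbank : List String := ["PAT", "LOC", "---", "ACT", "BEN"]
def Spec_roles_to_propbank (roles : List String) (out : String) : Prop := out = roles_to_propbank_alt roles
instance (roles : List String) (out : String) : Decidable (Spec_roles_to_propbank roles out) := by
  unfold Spec_roles_to_propbank; infer_instance

-- ===== CLAIM (what is proved, stated in full; the proofs are below) =====
def Claim_equal_roles_to_propbank : Prop := ∀ (roles : List String), Dom_roles_to_propbank roles → Pre_roles_to_propbank roles → Spec_roles_to_propbank roles (roles_to_propbank roles)

-- ===== LEMMAS AND PROOFS =====

-- the common sort key: position in the hierarchy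
def pvKey (f : String) : Nat := (PySem.List.index? pvHier f).getD pvHier.length

theorem pvKey_inj : ∀ a ∈ pvHier, ∀ b ∈ pvHier, pvKey a = pvKey b → a = b := by decide
theorem pvKey_ACT : pvKey "ACT" = 0 := by decide
theorem pvKey_PAT : pvKey "PAT" = 1 := by decide
theorem pvKey_ge_one : ∀ a ∈ pvHier, a ≠ "ACT" → 1 ≤ pvKey a := by decide

-- a key-sorted list with a key injective on its elements is the unique key-monotone rearrangement
theorem sorted_unique {key : String → Nat} : ∀ (l₁ l₂ : List String), l₁.Perm l₂ →
    l₁.Pairwise (fun a b => key a ≤ key b) → l₂.Pairwise (fun a b => key a ≤ key b) →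
    (∀ a ∈ l₁, ∀ b ∈ l₁, key a = key b → a = b) → l₁ = l₂
  | [], l₂, h, _, _, _ => (h.nil_eq).symm ▸ rfl
  | a :: t, [], h, _, _, _ => absurd h.symm.nil_eq (by simp)
  | a :: t, b :: t₂, h, s1, s2, inj => by
    have hab : a = b := by
      have hbmem : b ∈ a :: t := h.mem_iff.mpr (by simp)
      have hamem : a ∈ b :: t₂ := h.mem_iff.mp (by simp)
      have h1 : key a ≤ key b := by
        rcases List.mem_cons.mp hbmem with rfl | hb
        · exact le_refl _
        · exact (List.pairwise_cons.mp s1).1 b hb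
      have h2 : key b ≤ key a := by
        rcases List.mem_cons.mp hamem with rfl | ha
        · exact le_refl _
        · exact (List.pairwise_cons.mp s2).1 a ha
      exact inj a (by simp) b hbmem (Nat.le_antisymm h1 h2)
    subst hab
    have ht : t = t₂ := sorted_unique t t₂ h.cons_inv (List.pairwise_cons.mp s1).2
      (List.pairwise_cons.mp s2).2
      (fun x hx y hy hk => inj x (List.mem_cons_of_mem _ hx) y (List.mem_cons_of_mem _ hy) hk)
    rw [ht]

-- sorted(kept, key) is pref ++ sorted(rest, key) whenever that list is a key-monotone rearrangement
theorem sorted_eq_pref_append (kept pref rest : List String)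
    (hmem : ∀ f ∈ kept, f ∈ pvHier)
    (hperm : (pref ++ rest).Perm kept)
    (hpair : (pref ++ PySem.List.sorted rest pvKey false).Pairwise (fun a b => pvKey a ≤ pvKey b)) :
    PySem.List.sorted kept pvKey false = pref ++ PySem.List.sorted rest pvKey false := by
  apply sorted_unique _ _ _ (PySem.List.sorted_pairwise _ _) hpair
  · intro a ha b hb hk
    exact pvKey_inj a (hmem a ((PySem.List.mem_sorted _ _ _ _).mp ha))
      b (hmem b ((PySem.List.mem_sorted _ _ _ _).mp hb)) hk
  · exact (PySem.List.sorted_perm _ _ _).trans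
      (hperm.symm.trans ((PySem.List.sorted_perm rest pvKey false).append_left pref).symm)

-- shifting the start of enumerate
theorem enum_shift (c : Int) : ∀ (ys : List String) (k : Int),
    PySem.List.enumerate ys (c + k) = (PySem.List.enumerate ys k).map (fun p => (c + p.1, p.2)) := by
  intro ys
  induction ys with
  | nil => intro k; simp [PySem.List.enumerate_nil]
  | cons y t ih =>
    intro k
    rw [PySem.List.enumerate_cons, PySem.List.enumerate_cons, List.map_cons]
    have : c + k + 1 = c + (k + 1) := by ring
    rw [this, ih (k + 1)]

-- the labelling pass commutes with the shift
theorem map_label_shift (c : Int) (ys : List String) :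
    (PySem.List.enumerate ys c).map (fun p => p.2 ++ " [ARG" ++ PySem.Int.toStr p.1 ++ "]") =
    (PySem.List.enumerate ys 0).map (fun p => p.2 ++ " [ARG" ++ PySem.Int.toStr (c + p.1) ++ "]") := by
  have h := enum_shift c ys 0
  rw [add_zero] at h
  rw [h, List.map_map]
  rfl

-- ===== VERDICT (by name: the statement is the Claim_ definition above) =====
theorem roles_to_propbank_spec : Claim_equal_roles_to_propbank := by
  intro roles _hdom hpre
  obtain ⟨hhier, hdup⟩ := hpre
  unfold Spec_roles_to_propbank roles_to_propbank roles_to_propbank_alt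
  set kept := roles.filter (fun f => !(["---", ""].contains (PySem.Str.strip f))) with hkept
  set s₀ := PySem.List.sorted kept (fun f => f) false with hs₀
  have hmemk : ∀ f ∈ kept, f ∈ pvHier := by
    intro f hf
    have := List.mem_filter.mp hf
    simp only [List.contains_eq_mem, Bool.not_eq_eq_eq_not, Bool.not_true, List.mem_cons,
      decide_eq_false_iff_not, not_or] at this
    exact hhier f this.1 this.2.1 this.2.2.1
  have hmems : ∀ f ∈ s₀, f ∈ pvHier := fun f hf => hmemk f ((PySem.List.mem_sorted _ _ _ _).mp hf)
  have hperm₀ : s₀.Perm kept := PySem.List.sorted_perm _ _ _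
  have hcACT : s₀.count "ACT" = roles.count "ACT" := by
    rw [hperm₀.count_eq, hkept, List.count_filter (by decide)]
  have hcPAT : s₀.count "PAT" = roles.count "PAT" := by
    rw [hperm₀.count_eq, hkept, List.count_filter (by decide)]
  by_cases hA : "ACT" ∈ s₀
  · have hA' : s₀.contains "ACT" = true := by simpa using hA
    have hrem : (PySem.List.remove? s₀ "ACT").getD s₀ = s₀.erase "ACT" := by
      rw [PySem.List.remove?_eq_some_erase s₀ "ACT" hA]; rfl
    by_cases hP : "PAT" ∈ s₀.erase "ACT"
    · -- both ACT and PAT present: pref = [ACT, PAT]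
      have hP' : (s₀.erase "ACT").contains "PAT" = true := by simpa using hP
      have hPs₀ : "PAT" ∈ s₀ := List.mem_of_mem_erase hP
      have hcle : roles.count "ACT" ≤ 1 := by
        rcases hdup with h | h
        · exact h
        · exact absurd ((List.count_pos_iff).mpr hPs₀) (by rw [hcPAT, h]; simp)
      have hACTnotin : "ACT" ∉ (s₀.erase "ACT").erase "PAT" := by
        apply List.count_eq_zero.mp
        rw [List.count_erase_of_ne (by decide), List.count_erase_self, hcACT]
        omega
      have hsort : PySem.List.sorted kept pvKey false =
          ["ACT", "PAT"] ++ PySem.List.sorted ((s₀.erase "ACT").erase "PAT") pvKey false := by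
        apply sorted_eq_pref_append kept _ _ hmemk
        · exact (List.Perm.cons "ACT" (List.perm_cons_erase hP).symm).trans
            ((List.perm_cons_erase hA).symm.trans hperm₀)
        · rw [List.pairwise_append]
          refine ⟨by simp [pvKey_ACT, pvKey_PAT], PySem.List.sorted_pairwise _ _, ?_⟩
          intro a ha b hb
          have hbmem : b ∈ (s₀.erase "ACT").erase "PAT" := (PySem.List.mem_sorted _ _ _ _).mp hb
          have hbhier : b ∈ pvHier :=
            hmems b (List.mem_of_mem_erase (List.mem_of_mem_erase hbmem))
          have hbne : b ≠ "ACT" := fun h => hACTnotin (h ▸ hbmem)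
          rcases List.mem_cons.mp ha with rfl | ha'
          · rw [pvKey_ACT]; exact Nat.zero_le _
          · rcases List.mem_singleton.mp ha' with rfl
            rw [pvKey_PAT]; exact pvKey_ge_one b hbhier hbne
      have hrem2 : (PySem.List.remove? (s₀.erase "ACT") "PAT").getD (s₀.erase "ACT") =
          (s₀.erase "ACT").erase "PAT" := by
        rw [PySem.List.remove?_eq_some_erase _ "PAT" hP]; rfl
      simp only [List.foldl_cons, List.foldl_nil, hA', if_true, hrem, hP', hrem2]
      rw [show (fun f => (PySem.List.index? pvHier f).getD pvHier.length) = pvKey from rfl]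
      rw [hsort, PySem.List.enumerate_append, PySem.List.enumerate_cons,
        PySem.List.enumerate_cons, PySem.List.enumerate_nil]
      rw [List.map_append, map_label_shift ((0 : Int) + ↑(["ACT", "PAT"] : List String).length)]
      simp
    · -- ACT present, PAT absent: pref = [ACT]
      have hP' : (s₀.erase "ACT").contains "PAT" = false := by simpa using hP
      have hsort : PySem.List.sorted kept pvKey false =
          ["ACT"] ++ PySem.List.sorted (s₀.erase "ACT") pvKey false := by
        apply sorted_eq_pref_append kept _ _ hmemk
        · exact (List.perm_cons_erase hA).symm.trans hperm₀
        · rw [List.pairwise_append]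
          refine ⟨by simp, PySem.List.sorted_pairwise _ _, ?_⟩
          intro a ha b _
          rcases List.mem_singleton.mp ha with rfl
          rw [pvKey_ACT]; exact Nat.zero_le _
      simp only [List.foldl_cons, List.foldl_nil, hA', if_true, hrem, hP', if_false,
        Bool.false_eq_true]
      rw [show (fun f => (PySem.List.index? pvHier f).getD pvHier.length) = pvKey from rfl]
      rw [hsort, PySem.List.enumerate_append, PySem.List.enumerate_cons, PySem.List.enumerate_nil]
      rw [List.map_append, map_label_shift ((0 : Int) + ↑(["ACT"] : List String).length)]
      simp
  · have hA' : s₀.contains "ACT" = false := by simpa using hA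
    by_cases hP : "PAT" ∈ s₀
    · -- ACT absent, PAT present: pref = [PAT], PAT gets ARG0
      have hP' : s₀.contains "PAT" = true := by simpa using hP
      have hrem : (PySem.List.remove? s₀ "PAT").getD s₀ = s₀.erase "PAT" := by
        rw [PySem.List.remove?_eq_some_erase s₀ "PAT" hP]; rfl
      have hsort : PySem.List.sorted kept pvKey false =
          ["PAT"] ++ PySem.List.sorted (s₀.erase "PAT") pvKey false := by
        apply sorted_eq_pref_append kept _ _ hmemk
        · exact (List.perm_cons_erase hP).symm.trans hperm₀
        · rw [List.pairwise_append]
          refine ⟨by simp, PySem.List.sorted_pairwise _ _, ?_⟩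
          intro a ha b hb
          have hbmem : b ∈ s₀.erase "PAT" := (PySem.List.mem_sorted _ _ _ _).mp hb
          have hbhier : b ∈ pvHier := hmems b (List.mem_of_mem_erase hbmem)
          have hbne : b ≠ "ACT" := fun h => hA (h ▸ List.mem_of_mem_erase hbmem)
          rcases List.mem_singleton.mp ha with rfl
          rw [pvKey_PAT]; exact pvKey_ge_one b hbhier hbne
      simp only [List.foldl_cons, List.foldl_nil, hA', if_false, Bool.false_eq_true, hP',
        if_true, hrem]
      rw [show (fun f => (PySem.List.index? pvHier f).getD pvHier.length) = pvKey from rfl]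
      rw [hsort, PySem.List.enumerate_append, PySem.List.enumerate_cons, PySem.List.enumerate_nil]
      rw [List.map_append, map_label_shift ((0 : Int) + ↑(["PAT"] : List String).length)]
      simp
    · -- neither present: pref = []
      have hP' : s₀.contains "PAT" = false := by simpa using hP
      have hsort : PySem.List.sorted kept pvKey false =
          [] ++ PySem.List.sorted s₀ pvKey false := by
        apply sorted_eq_pref_append kept _ _ hmemk
        · exact hperm₀
        · exact (List.nil_append _) ▸ PySem.List.sorted_pairwise _ _
      simp only [List.foldl_cons, List.foldl_nil, hA', hP', if_false, Bool.false_eq_true]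
      rw [show (fun f => (PySem.List.index? pvHier f).getD pvHier.length) = pvKey from rfl]
      rw [hsort]
      simp
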